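-- pv_equiv track=rewrite | github.com/xinlu-up/lx_0914 | test15.py | count_even_length_xor_subarrays
-- ===== SOURCE A (Python) =====
-- def count_even_length_xor_subarrays(a, x):
--     n = len(a)
--     prefix_xor = [0] * (n + 1)
--     count = 0
--     xor_map = {}
--
--     # 初始化前缀异或和数组
--     for i in range(1, n + 1):
--         prefix_xor[i] = prefix_xor[i - 1] ^ a[i - 1]
--
--         # 遍历前缀异或和数组，查找满足条件的区间
--     for i in range(n + 1):
--         target = prefix_xor[i] ^ x
--         if target in xor_map:
--             # 由于我们需要偶数长度的区间，因此我们需要检查索引的奇偶性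
--             # 如果 i 和 xor_map[target] 中的索引具有相同的奇偶性，则它们之间的区间长度为偶数
--             for idx in xor_map[target]:
--                 if (i - idx) % 2 == 0:
--                     count += 1
--
--                     # 将当前前缀异或和及其索引添加到哈希表中
--         # 注意：我们存储的是索引列表，以便处理多个相同前缀异或和的情况
--         if prefix_xor[i] not in xor_map:
--             xor_map[prefix_xor[i]] = []
--         xor_map[prefix_xor[i]].append(i)
--
--     return count
-- ===== SOURCE B (Python) =====
-- def count_even_length_xor_subarrays(a, x):
--     # One pass over prefix XORs with a counter keyed by (prefix_xor, index parity):
--     # a subarray (j, i] has even length and XOR x iff prefix[j] == prefix[i] ^ x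
--     # and j, i have the same parity.
--     cnt = {}
--     count = 0
--     p = 0
--     for i, v in enumerate(a):
--         count += cnt.get((p ^ x, i & 1), 0)
--         key = (p, i & 1)
--         cnt[key] = cnt.get(key, 0) + 1
--         p ^= v
--     count += cnt.get((p ^ x, len(a) & 1), 0)
--     return count
-- ===== Notes on version B (the rewrite author's own statement) =====
-- stated objective: alternative
-- what changed: A stores, per prefix-XOR value, the full list of earlier indices and rescans it at every step to count same-parity matches; B keeps a single counter keyed by (prefix_xor, index parity), so each prefix does one dictionary lookup instead of scanning a stored index list.
import Mathlib
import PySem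

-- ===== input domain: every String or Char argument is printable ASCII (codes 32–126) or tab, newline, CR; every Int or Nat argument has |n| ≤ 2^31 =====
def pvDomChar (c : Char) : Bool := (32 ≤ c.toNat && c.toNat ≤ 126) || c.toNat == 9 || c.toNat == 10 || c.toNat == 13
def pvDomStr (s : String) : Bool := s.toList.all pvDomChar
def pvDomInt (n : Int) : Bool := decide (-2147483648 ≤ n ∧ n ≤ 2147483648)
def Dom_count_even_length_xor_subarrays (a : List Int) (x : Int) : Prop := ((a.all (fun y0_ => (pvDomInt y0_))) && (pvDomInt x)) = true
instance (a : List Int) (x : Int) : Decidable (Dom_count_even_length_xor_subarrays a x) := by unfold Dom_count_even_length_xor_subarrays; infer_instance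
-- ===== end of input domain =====

-- B replaces A's dict of index lists (rescanned per prefix) by a counter keyed by
-- (prefix_xor, index parity): one dictionary lookup per prefix instead of a scan
-- of all stored indices with the same prefix XOR (objective: alternative algorithm).

-- ===== PORT A =====
-- Port of A. All list indices below are produced by the loops and are always in
-- range, so `List.getD` is exact where Python indexes `prefix_xor[i-1]` / `a[i-1]` /
-- `prefix_xor[i]`.
def count_even_length_xor_subarrays (a : List Int) (x : Int) : Int :=
  let n := a.length
  -- for i in range(1, n+1): prefix_xor[i] = prefix_xor[i-1] ^ a[i-1]
  let prefix_xor : List Int :=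
    (List.range n).foldl (fun px k => px ++ [PySem.Int.bxor (px.getD k 0) (a.getD k 0)]) [0]
  -- for i in range(n+1): look up target, scan its index list, then append i
  let st :=
    (List.range (n + 1)).foldl
      (fun (st : Int × PySem.Dict Int (List Int)) i =>
        let pxi := prefix_xor.getD i 0
        let target := PySem.Int.bxor pxi x
        let count :=
          if st.2.contains target then
            (st.2.getD target []).foldl
              (fun c idx => if PySem.Int.mod ((i : Int) - idx) 2 = 0 then c + 1 else c) st.1
          else st.1
        let m := if st.2.contains pxi then st.2 else st.2.insert pxi []
        (count, m.modify pxi [] (fun l => l ++ [(i : Int)])))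
      (0, PySem.Dict.empty)
  st.1

-- ===== PORT B =====
def count_even_length_xor_subarrays_alt (a : List Int) (x : Int) : Int :=
  let st :=
    (PySem.List.enumerate a).foldl
      (fun (st : Int × Int × PySem.Dict (Int × Int) Int) iv =>
        let p := st.1
        let par := PySem.Int.band iv.1 1
        let count := st.2.1 + st.2.2.getD (PySem.Int.bxor p x, par) 0
        let cnt := st.2.2.insert (p, par) (st.2.2.getD (p, par) 0 + 1)
        (PySem.Int.bxor p iv.2, count, cnt))
      (0, 0, PySem.Dict.empty)
  st.2.1 + st.2.2.getD (PySem.Int.bxor st.1 x, PySem.Int.band (PySem.List.len a) 1) 0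

-- ===== PRECONDITION & SPEC =====
def Spec_count_even_length_xor_subarrays (a : List Int) (x : Int) (out : Int) : Prop := out = count_even_length_xor_subarrays_alt a x
instance (a : List Int) (x : Int) (out : Int) : Decidable (Spec_count_even_length_xor_subarrays a x out) := by unfold Spec_count_even_length_xor_subarrays; infer_instance

-- ===== CLAIM (what is proved, stated in full; the proofs are below) =====
def Claim_equal_count_even_length_xor_subarrays : Prop := ∀ (a : List Int) (x : Int), Dom_count_even_length_xor_subarrays a x → Spec_count_even_length_xor_subarrays a x (count_even_length_xor_subarrays a x)

-- ===== LEMMAS AND PROOFS =====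

-- prefix XOR of the first j elements of a
def pvPx (a : List Int) (j : Nat) : Int := (a.take j).foldl PySem.Int.bxor 0

-- number of indices j < i with matching prefix XOR and parity, counted at step i
def pvInner (a : List Int) (x : Int) (i : Nat) : Nat :=
  ((List.range i).filter
    (fun j => pvPx a j = PySem.Int.bxor (pvPx a i) x ∧ j % 2 = i % 2)).length

-- the total count accumulated after the first m steps
def pvC (a : List Int) (x : Int) (m : Nat) : Int :=
  ((List.range m).map (fun i => (pvInner a x i : Int))).sum

-- the index list A's dict stores under key v after m steps
def pvLst (a : List Int) (v : Int) (m : Nat) : List Int :=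
  ((List.range m).filter (fun j => pvPx a j = v)).map (fun j => Int.ofNat j)

lemma pvPx_succ (a : List Int) (k : Nat) (hk : k < a.length) :
    pvPx a (k + 1) = PySem.Int.bxor (pvPx a k) (a.getD k 0) := by
  rw [pvPx, pvPx, List.take_add_one, a.getElem?_eq_getElem hk, a.getD_eq_getElem 0 hk,
    Option.toList_some, List.foldl_append, List.foldl_cons, List.foldl_nil]

lemma pvC_succ (a : List Int) (x : Int) (m : Nat) :
    pvC a x (m + 1) = pvC a x m + (pvInner a x m : Int) := by
  simp [pvC, List.range_succ]

lemma pvLst_succ (a : List Int) (v : Int) (m : Nat) :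
    pvLst a v (m + 1) =
      if pvPx a m = v then pvLst a v m ++ [(m : Int)] else pvLst a v m := by
  simp only [pvLst, List.range_succ, List.filter_append, List.map_append]
  split_ifs with h <;> simp [h]

lemma pvInner_eq_zero (a : List Int) (x : Int) (m : Nat)
    (h : pvLst a (PySem.Int.bxor (pvPx a m) x) m = []) : pvInner a x m = 0 := by
  have h0 : ((List.range m).filter
      (fun j => pvPx a j = PySem.Int.bxor (pvPx a m) x)).length = 0 := by
    rw [pvLst] at h
    simp only [List.map_eq_nil_iff] at h
    simp [h]
  rw [pvInner, ← List.countP_eq_length_filter] at *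
  have := List.countP_mono_left (l := List.range m)
    (p := fun j => decide (pvPx a j = PySem.Int.bxor (pvPx a m) x ∧ j % 2 = m % 2))
    (q := fun j => decide (pvPx a j = PySem.Int.bxor (pvPx a m) x))
    (by intro j _ hj; simp at hj ⊢; exact hj.1)
  omega

-- A's inner scan over the stored index list counts exactly pvInner
lemma pvInnerScan (a : List Int) (x : Int) (i : Nat) (c : Int) :
    (pvLst a (PySem.Int.bxor (pvPx a i) x) i).foldl
      (fun c idx => if PySem.Int.mod ((i : Int) - idx) 2 = 0 then c + 1 else c) c
      = c + (pvInner a x i : Int) := by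
  have h := PySem.List.foldl_count_if
      (fun idx : Int => decide (PySem.Int.mod ((i : Int) - idx) 2 = 0))
      (pvLst a (PySem.Int.bxor (pvPx a i) x) i) c
  simp only [decide_eq_true_eq] at h
  rw [h]
  congr 1
  rw [pvInner, ← List.countP_eq_length_filter, pvLst]
  simp only [List.countP_map, List.countP_filter]
  norm_cast
  apply List.countP_congr
  intro j hj
  simp [Function.comp, Int.ofNat_eq_natCast, And.comm]
  intro _
  omega

lemma pvParKey (m : Nat) : PySem.Int.band (m : Int) 1 = ((m % 2 : Nat) : Int) := by
  rw [show (1 : Int) = ((1 : Nat) : Int) from rfl, PySem.Int.band_natCast]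
  norm_num [Nat.and_one_is_mod]

lemma pvFilterPar (a : List Int) (x : Int) (m : Nat) :
    ((List.range m).filter
      (fun j => pvPx a j = PySem.Int.bxor (pvPx a m) x
        ∧ ((j % 2 : Nat) : Int) = ((m % 2 : Nat) : Int))).length
      = pvInner a x m := by
  rw [pvInner]
  congr 1
  apply List.filter_congr
  intro j _
  rw [decide_eq_decide]
  constructor <;> rintro ⟨h1, h2⟩ <;> exact ⟨h1, by omega⟩

-- the first loop of A builds the table of prefix XORs
lemma pvPrefixLoop (a : List Int) (m : Nat) (hm : m ≤ a.length) :
    (List.range m).foldl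
        (fun px k => px ++ [PySem.Int.bxor (px.getD k 0) (a.getD k 0)]) [0]
      = (List.range (m + 1)).map (pvPx a) := by
  induction m with
  | zero => simp [pvPx]
  | succ m ih =>
    rw [List.range_succ, List.foldl_append, ih (by omega), List.foldl_cons, List.foldl_nil]
    have hget : ((List.range (m + 1)).map (pvPx a)).getD m 0 = pvPx a m := by
      rw [List.getD_eq_getElem _ _ (by simp)]
      simp
    rw [hget, List.range_succ (n := m + 1), List.map_append, ← pvPx_succ a m (by omega)]
    simp

-- the second loop of A: count is pvC, the dict stores the pvLst index lists
lemma pvALoop (a : List Int) (x : Int) (m : Nat) (hm : m ≤ a.length + 1) :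
    ∃ d : PySem.Dict Int (List Int),
      (List.range m).foldl
        (fun (st : Int × PySem.Dict Int (List Int)) i =>
          let pxi := ((List.range (a.length + 1)).map (pvPx a)).getD i 0
          let target := PySem.Int.bxor pxi x
          let count :=
            if st.2.contains target then
              (st.2.getD target []).foldl
                (fun c idx => if PySem.Int.mod ((i : Int) - idx) 2 = 0 then c + 1 else c) st.1
            else st.1
          let m := if st.2.contains pxi then st.2 else st.2.insert pxi []
          (count, m.modify pxi [] (fun l => l ++ [(i : Int)])))
        (0, PySem.Dict.empty)
      = (pvC a x m, d)
      ∧ (∀ v, d.getD v [] = pvLst a v m)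
      ∧ (∀ v, d.contains v = false → pvLst a v m = []) := by
  induction m with
  | zero =>
    refine ⟨PySem.Dict.empty, by simp [pvC], fun v => ?_, fun v _ => ?_⟩ <;>
      simp [pvLst, PySem.Dict.getD_empty]
  | succ m ih =>
    obtain ⟨d, heq, hgetD, hcon⟩ := ih (by omega)
    rw [List.range_succ (n := m), List.foldl_append, heq, List.foldl_cons, List.foldl_nil]
    have hpxi : ((List.range (a.length + 1)).map (pvPx a)).getD m 0 = pvPx a m := by
      rw [List.getD_eq_getElem _ _ (by simp; omega)]
      simp
    dsimp only
    rw [hpxi]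
    have hbaseD : ∀ v,
        (if d.contains (pvPx a m) then d else d.insert (pvPx a m) []).getD v []
          = pvLst a v m := by
      intro v
      split_ifs with hc
      · exact hgetD v
      · rw [PySem.Dict.getD_insert]
        split_ifs with hv
        · subst hv
          exact (hcon (pvPx a m) (by simpa using hc)).symm
        · exact hgetD v
    have hcount :
        (if d.contains (PySem.Int.bxor (pvPx a m) x) then
          (d.getD (PySem.Int.bxor (pvPx a m) x) []).foldl
            (fun c idx => if PySem.Int.mod ((m : Int) - idx) 2 = 0 then c + 1 else c)
            (pvC a x m)
         else pvC a x m) = pvC a x (m + 1) := by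
      rw [pvC_succ]
      split_ifs with hc
      · rw [hgetD _]
        exact pvInnerScan a x m (pvC a x m)
      · rw [pvInner_eq_zero a x m (hcon _ (by simpa using hc))]
        simp
    refine ⟨(if d.contains (pvPx a m) then d else d.insert (pvPx a m) []).modify
        (pvPx a m) [] (fun l => l ++ [(m : Int)]), ?_, fun v => ?_, fun v hvc => ?_⟩
    · rw [hcount]
    · rw [PySem.Dict.getD_modify, pvLst_succ]
      by_cases hv : v = pvPx a m
      · subst hv
        rw [if_pos rfl, if_pos rfl, hbaseD]
      · rw [if_neg hv, if_neg (fun h => hv (Eq.symm h)), hbaseD]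
    · rw [PySem.Dict.contains_modify] at hvc
      simp only [Bool.or_eq_false_iff, beq_eq_false_iff_ne, ne_eq] at hvc
      obtain ⟨hvP, hbc⟩ := hvc
      have hdc : d.contains v = false := by
        by_cases hc : d.contains (pvPx a m)
        · rwa [if_pos hc] at hbc
        · rw [if_neg hc, PySem.Dict.contains_insert] at hbc
          simp only [Bool.or_eq_false_iff] at hbc
          exact hbc.2
      rw [pvLst_succ, if_neg (fun h => hvP (Eq.symm h)), hcon v hdc]

-- B's loop: the state is (current prefix XOR, pvC, the parity counter)
lemma pvBLoop (a : List Int) (x : Int) (m : Nat) (hm : m ≤ a.length) :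
    ∃ d : PySem.Dict (Int × Int) Int,
      (List.range m).foldl
        (fun (st : Int × Int × PySem.Dict (Int × Int) Int) (k : Nat) =>
          let p := st.1
          let par := PySem.Int.band (k : Int) 1
          let count := st.2.1 + st.2.2.getD (PySem.Int.bxor p x, par) 0
          let cnt := st.2.2.insert (p, par) (st.2.2.getD (p, par) 0 + 1)
          (PySem.Int.bxor p (a.getD k 0), count, cnt))
        (0, 0, PySem.Dict.empty)
      = (pvPx a m, pvC a x m, d)
      ∧ (∀ key : Int × Int,
          d.getD key 0 =
            (((List.range m).filter
              (fun j => pvPx a j = key.1 ∧ ((j % 2 : Nat) : Int) = key.2)).length : Int)) := by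
  induction m with
  | zero =>
    refine ⟨PySem.Dict.empty, by simp [pvPx, pvC], fun key => ?_⟩
    simp [PySem.Dict.getD_empty]
  | succ m ih =>
    obtain ⟨d, heq, hgetD⟩ := ih (by omega)
    rw [List.range_succ (n := m), List.foldl_append, heq, List.foldl_cons, List.foldl_nil]
    dsimp only
    rw [pvParKey m]
    refine ⟨d.insert (pvPx a m, ((m % 2 : Nat) : Int))
        (d.getD (pvPx a m, ((m % 2 : Nat) : Int)) 0 + 1), ?_, fun key => ?_⟩
    · rw [← pvPx_succ a m (by omega), pvC_succ, hgetD _, pvFilterPar]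
    · rw [PySem.Dict.getD_insert, List.filter_append]
      by_cases hk : key = (pvPx a m, ((m % 2 : Nat) : Int))
      · subst hk
        rw [if_pos rfl, hgetD _]
        simp
      · rw [if_neg hk, hgetD _]
        have hone : (List.filter
            (fun j => decide (pvPx a j = key.1 ∧ ((j % 2 : Nat) : Int) = key.2)) [m]) = [] := by
          rw [List.filter_cons, if_neg ?_, List.filter_nil]
          simp only [decide_eq_true_eq]
          rintro ⟨h1, h2⟩
          apply hk
          cases key
          simp_all
        rw [hone, List.append_nil]

lemma pvA_eq (a : List Int) (x : Int) :
    count_even_length_xor_subarrays a x = pvC a x (a.length + 1) := by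
  obtain ⟨d, heq, -⟩ := pvALoop a x (a.length + 1) le_rfl
  simp only [count_even_length_xor_subarrays]
  rw [pvPrefixLoop a a.length le_rfl, heq]

lemma pvB_eq (a : List Int) (x : Int) :
    count_even_length_xor_subarrays_alt a x = pvC a x (a.length + 1) := by
  obtain ⟨d, heq, hgetD⟩ := pvBLoop a x a.length le_rfl
  simp only [count_even_length_xor_subarrays_alt]
  rw [PySem.List.enumerate_eq_map_pyRange a 0, PySem.List.pyRange_one, PySem.List.len_eq]
  simp only [Int.sub_zero, Int.toNat_natCast, List.foldl_map, zero_add,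
    PySem.List.pyGetD_natCast]
  rw [heq]
  dsimp only
  rw [pvParKey a.length, hgetD _, pvFilterPar, pvC_succ]

-- ===== VERDICT (by name: the statement is the Claim_ definition above) =====
theorem count_even_length_xor_subarrays_spec : Claim_equal_count_even_length_xor_subarrays := by
  intro a x _
  unfold Spec_count_even_length_xor_subarrays
  rw [pvA_eq, pvB_eq]
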